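-- pv_equiv track=rewrite | github.com/dw425/DAIS_SEG | docs/nifi-analyzer/backend/app/engines/generators/processor_translators.py | _extract_python_logic
-- ===== SOURCE A (Python) =====
-- def _extract_python_logic(script_body: str) -> str:
--     """Extract the core transformation logic from a NiFi Python script.
--
--     NiFi Python scripts typically access FlowFile via session.get(), read content,
--     process it, and write back. We extract the processing part.
--     """
--     lines = script_body.strip().split("\n")
--     core_lines = []
--     in_process = False
--
--     for line in lines:
--         stripped = line.strip()
--         # Skip NiFi session boilerplate
--         if any(kw in stripped for kw in [
--             "session.get", "session.transfer", "session.commit",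
--             "session.rollback", "flowFile", "FlowFile",
--             "import org.", "import java.",
--         ]):
--             continue
--         # Skip empty lines at the start
--         if not core_lines and not stripped:
--             continue
--         # Start collecting after we see actual logic
--         if stripped and not stripped.startswith("#"):
--             in_process = True
--         if in_process:
--             core_lines.append(line)
--
--     if core_lines:
--         return "\n".join(core_lines)
--     return ""
-- ===== SOURCE B (Python) =====
-- _KEYWORDS = [
--     "session.get", "session.transfer", "session.commit",
--     "session.rollback", "flowFile", "FlowFile",
--     "import org.", "import java.",
-- ]
--
--
-- def _is_boiler(stripped):
--     return any(kw in stripped for kw in _KEYWORDS)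
--
--
-- def _extract_python_logic(script_body: str) -> str:
--     lines = script_body.strip().split("\n")
--     start = next(
--         (i for i, line in enumerate(lines)
--          if (s := line.strip()) and not s.startswith("#") and not _is_boiler(s)),
--         None,
--     )
--     if start is None:
--         return ""
--     return "\n".join(line for line in lines[start:] if not _is_boiler(line.strip()))
-- ===== Notes on version B (the rewrite author's own statement) =====
-- stated objective: simpler
-- what changed: Replaced the stateful single pass with an in_process flag and a leading-empty guard by a locate-then-filter decomposition: find the index of the first logic line, return '' if none, else join the non-boilerplate lines of the tail slice.
import Mathlib
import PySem

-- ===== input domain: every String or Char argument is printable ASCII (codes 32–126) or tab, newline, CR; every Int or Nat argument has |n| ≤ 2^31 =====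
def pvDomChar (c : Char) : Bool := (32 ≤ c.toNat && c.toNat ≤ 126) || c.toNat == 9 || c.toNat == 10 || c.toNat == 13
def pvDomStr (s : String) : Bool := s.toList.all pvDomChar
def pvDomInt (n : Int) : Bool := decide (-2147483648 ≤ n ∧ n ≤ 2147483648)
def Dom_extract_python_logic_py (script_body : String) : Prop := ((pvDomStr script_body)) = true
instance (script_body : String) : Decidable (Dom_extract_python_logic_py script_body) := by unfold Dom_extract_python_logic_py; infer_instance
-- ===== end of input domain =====

-- B replaces A's stateful flag loop by a locate-the-first-logic-line-then-filter-the-tail decomposition (simpler; same cost).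

-- ===== PORT A =====
def pvStepA (st : List String × Bool) (line : String) : List String × Bool :=
  let stripped := PySem.Str.strip line
  if ["session.get", "session.transfer", "session.commit",
      "session.rollback", "flowFile", "FlowFile",
      "import org.", "import java."].any (fun kw => PySem.Str.isIn kw stripped) then st
  else if st.1.isEmpty && stripped == "" then st
  else
    let in_process := if stripped != "" && !PySem.Str.startswith stripped "#" then true else st.2
    if in_process then (st.1 ++ [line], in_process) else (st.1, in_process)

def extract_python_logic_py (script_body : String) : String :=
  -- s.split("\n"): sep is the nonempty literal "\n", so split? is always `some` and getD is exact
  let lines := (PySem.Str.split? (PySem.Str.strip script_body) "\n").getD []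
  let core := (lines.foldl pvStepA ([], false)).1
  if !core.isEmpty then PySem.Str.join "\n" core else ""

-- ===== PORT B =====
def pvIsBoilerB (stripped : String) : Bool :=
  ["session.get", "session.transfer", "session.commit",
   "session.rollback", "flowFile", "FlowFile",
   "import org.", "import java."].any (fun kw => PySem.Str.isIn kw stripped)

def pvIsLogicB (line : String) : Bool :=
  let s := PySem.Str.strip line
  s != "" && !PySem.Str.startswith s "#" && !pvIsBoilerB s

def extract_python_logic_py_alt (script_body : String) : String :=
  -- s.split("\n"): sep is the nonempty literal "\n", so split? is always `some` and getD is exact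
  let lines := (PySem.Str.split? (PySem.Str.strip script_body) "\n").getD []
  match lines.findIdx? pvIsLogicB with
  | none => ""
  | some i => PySem.Str.join "\n" ((lines.drop i).filter (fun l => !pvIsBoilerB (PySem.Str.strip l)))

-- ===== PRECONDITION & SPEC =====
def Spec_extract_python_logic_py (script_body : String) (out : String) : Prop := out = extract_python_logic_py_alt script_body
instance (script_body : String) (out : String) : Decidable (Spec_extract_python_logic_py script_body out) := by unfold Spec_extract_python_logic_py; infer_instance

-- ===== CLAIM (what is proved, stated in full; the proofs are below) =====
def Claim_equal_extract_python_logic_py : Prop := ∀ (script_body : String), Dom_extract_python_logic_py script_body → Spec_extract_python_logic_py script_body (extract_python_logic_py script_body)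

-- ===== LEMMAS AND PROOFS =====

-- A's inline keyword test is definitionally B's helper predicate.
theorem pvBoiler_eq (s : String) :
    (["session.get", "session.transfer", "session.commit",
      "session.rollback", "flowFile", "FlowFile",
      "import org.", "import java."].any (fun kw => PySem.Str.isIn kw s)) = pvIsBoilerB s := rfl

-- Once in_process is true (and core is nonempty), each step appends the line iff it is not boilerplate.
theorem pvFoldA_true (ls : List String) (core : List String) (hc : core ≠ []) :
    ls.foldl pvStepA (core, true) =
      (core ++ ls.filter (fun l => !pvIsBoilerB (PySem.Str.strip l)), true) := by
  induction ls generalizing core with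
  | nil => simp
  | cons l ls ih =>
    simp only [List.foldl_cons, List.filter_cons]
    have hc' : core.isEmpty = false := by simpa using hc
    cases hb : pvIsBoilerB (PySem.Str.strip l) with
    | true =>
      have hstep : pvStepA (core, true) l = (core, true) := by
        simp only [pvStepA, pvBoiler_eq, hb, if_true]
      rw [hstep, ih core hc]
      simp
    | false =>
      have hstep : pvStepA (core, true) l = (core ++ [l], true) := by
        simp only [pvStepA, pvBoiler_eq, hb, hc']
        simp
      rw [hstep, ih (core ++ [l]) (by simp)]
      simp

-- Before any logic line has been seen, a non-logic line leaves the state ([], false).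
theorem pvStepA_skip (l : String) (h : pvIsLogicB l = false) :
    pvStepA ([], false) l = ([], false) := by
  simp only [pvIsLogicB, Bool.and_eq_false_iff] at h
  simp only [pvStepA, pvBoiler_eq]
  cases hb : pvIsBoilerB (PySem.Str.strip l) with
  | true => simp
  | false =>
    cases he : (PySem.Str.strip l == "") with
    | true => simp
    | false =>
      have he' : ¬ PySem.Str.strip l = "" := by simpa using he
      have hs : PySem.Chars.startswith (PySem.Chars.strip l.toList) ['#'] = true := by
        rcases h with (h | h) | h
        · simp at h; exact absurd h he'
        · simpa using h
        · simp [hb] at h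
      simp [hs]

-- The first logic line flips the flag and is collected.
theorem pvStepA_start (l : String) (h : pvIsLogicB l = true) :
    pvStepA ([], false) l = ([l], true) := by
  simp only [pvIsLogicB, Bool.and_eq_true] at h
  obtain ⟨⟨hne, hhash⟩, hnb⟩ := h
  have hb : pvIsBoilerB (PySem.Str.strip l) = false := by simpa using hnb
  have he : (PySem.Str.strip l == "") = false := by simpa using hne
  simp only [pvStepA, pvBoiler_eq, hb, he, hne, hhash]
  simp

-- Characterisation of A's fold in terms of B's findIdx?.
theorem pvFoldA_char (ls : List String) :
    ls.foldl pvStepA ([], false) =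
      match ls.findIdx? pvIsLogicB with
      | none => ([], false)
      | some i => ((ls.drop i).filter (fun l => !pvIsBoilerB (PySem.Str.strip l)), true) := by
  induction ls with
  | nil => simp
  | cons l ls ih =>
    cases hl : pvIsLogicB l with
    | true =>
      have hb : pvIsBoilerB (PySem.Str.strip l) = false := by
        simp only [pvIsLogicB, Bool.and_eq_true] at hl
        simpa using hl.2
      rw [List.findIdx?_cons]
      simp only [hl]
      simp only [List.foldl_cons, pvStepA_start l hl]
      rw [pvFoldA_true ls [l] (by simp)]
      simp [hb]
    | false =>
      rw [List.findIdx?_cons]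
      simp only [hl]
      simp only [List.foldl_cons, pvStepA_skip l hl, ih]
      cases h : ls.findIdx? pvIsLogicB with
      | none => simp
      | some i => simp

-- If findIdx? finds index i, the line there is logic, hence kept by the filter: nonempty tail.
theorem pvTail_ne_nil (ls : List String) (i : Nat) (h : ls.findIdx? pvIsLogicB = some i) :
    (ls.drop i).filter (fun l => !pvIsBoilerB (PySem.Str.strip l)) ≠ [] := by
  induction ls generalizing i with
  | nil => simp at h
  | cons l ls ih =>
    rw [List.findIdx?_cons] at h
    cases hl : pvIsLogicB l with
    | true =>
      simp [hl] at h
      have hb : pvIsBoilerB (PySem.Str.strip l) = false := by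
        simp only [pvIsLogicB, Bool.and_eq_true] at hl
        simpa using hl.2
      subst h
      simp [hb]
    | false =>
      simp only [hl, Bool.false_eq_true, if_false, Option.map_eq_some_iff] at h
      obtain ⟨j, hj, hji⟩ := h
      subst hji
      simpa using ih j hj

-- ===== VERDICT (by name: the statement is the Claim_ definition above) =====
theorem extract_python_logic_py_spec : Claim_equal_extract_python_logic_py := by
  intro s _
  simp only [Spec_extract_python_logic_py, extract_python_logic_py, extract_python_logic_py_alt]
  set ls := (PySem.Str.split? (PySem.Str.strip s) "\n").getD [] with hls
  rw [pvFoldA_char]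
  cases h : ls.findIdx? pvIsLogicB with
  | none => simp
  | some i =>
    simp only
    have hne := pvTail_ne_nil ls i h
    simp [hne]
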